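-- pv_equiv track=rewrite | github.com/JNZader/repoforge | repoforge/adapters.py | _layer_to_globs
-- ===== SOURCE A (Python) =====
-- def _layer_to_globs(layer_name: str, tech_stack: list[str] | None = None) -> list[str]:
--     """
--     Map a layer name to reasonable glob patterns for Cursor rules.
--
--     Uses tech stack hints to pick the right extensions.
--     """
--     py_exts = ["**/*.py"]
--     ts_exts = ["**/*.ts", "**/*.tsx"]
--     js_exts = ["**/*.js", "**/*.jsx"]
--     go_exts = ["**/*.go"]
--     rs_exts = ["**/*.rs"]
--     java_exts = ["**/*.java"]
--
--     stack = set(tech_stack or [])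
--
--     # Determine extensions based on tech stack
--     if stack & {"Python", "FastAPI", "Django", "Flask"}:
--         exts = py_exts
--     elif stack & {"TypeScript", "React", "Next.js", "Vue", "Svelte"}:
--         exts = ts_exts + js_exts
--     elif stack & {"Node.js", "Express", "Fastify"}:
--         exts = js_exts + ts_exts
--     elif stack & {"Go"}:
--         exts = go_exts
--     elif stack & {"Rust"}:
--         exts = rs_exts
--     elif stack & {"Java"}:
--         exts = java_exts
--     else:
--         # Fallback: common source extensions
--         exts = py_exts + ts_exts + js_exts
--
--     # Prefix with layer path if not "main" or "."
--     if layer_name in ("main", "."):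
--         return exts
--
--     return [f"{layer_name}/{e}" for e in exts]
-- ===== SOURCE B (Python) =====
-- # One pass over the tech stack: each known tech name maps (via a flat dict) to a
-- # language priority; keep the minimum priority seen and index an extensions table.
-- _PRIORITY = {
--     "Python": 0, "FastAPI": 0, "Django": 0, "Flask": 0,
--     "TypeScript": 1, "React": 1, "Next.js": 1, "Vue": 1, "Svelte": 1,
--     "Node.js": 2, "Express": 2, "Fastify": 2,
--     "Go": 3, "Rust": 4, "Java": 5,
-- }
--
-- _EXTS = [
--     ["**/*.py"],
--     ["**/*.ts", "**/*.tsx", "**/*.js", "**/*.jsx"],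
--     ["**/*.js", "**/*.jsx", "**/*.ts", "**/*.tsx"],
--     ["**/*.go"],
--     ["**/*.rs"],
--     ["**/*.java"],
--     ["**/*.py", "**/*.ts", "**/*.tsx", "**/*.js", "**/*.jsx"],  # fallback
-- ]
--
--
-- def _layer_to_globs(layer_name: str, tech_stack=None) -> list[str]:
--     best = 6
--     for t in tech_stack or []:
--         best = min(best, _PRIORITY.get(t, 6))
--     exts = _EXTS[best]
--     if layer_name in ("main", "."):
--         return list(exts)
--     return [f"{layer_name}/{e}" for e in exts]
-- ===== Notes on version B (the rewrite author's own statement) =====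
-- stated objective: alternative
-- what changed: Replaces the six set-intersection elif branches with a single pass over the tech stack that takes the minimum language priority from a flat name-to-priority dict and indexes an extensions table with it.
import Mathlib
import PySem

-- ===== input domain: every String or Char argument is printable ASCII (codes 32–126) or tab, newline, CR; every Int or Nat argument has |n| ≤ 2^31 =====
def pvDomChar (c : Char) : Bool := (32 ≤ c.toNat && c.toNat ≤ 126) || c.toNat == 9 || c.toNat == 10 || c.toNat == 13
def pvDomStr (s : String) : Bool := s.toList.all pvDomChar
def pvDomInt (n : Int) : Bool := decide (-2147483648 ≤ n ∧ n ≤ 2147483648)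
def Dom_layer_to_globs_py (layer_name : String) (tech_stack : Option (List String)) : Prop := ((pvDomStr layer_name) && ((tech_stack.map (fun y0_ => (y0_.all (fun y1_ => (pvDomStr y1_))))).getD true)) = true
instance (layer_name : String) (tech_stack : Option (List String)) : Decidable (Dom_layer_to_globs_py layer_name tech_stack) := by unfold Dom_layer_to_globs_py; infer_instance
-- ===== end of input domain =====

-- B replaces the set-intersection elif chain by ONE pass over the tech stack that keeps
-- the minimum language priority (flat name→priority dict) and indexes an extension table.

-- ===== PORT A =====
def layer_to_globs_py (layer_name : String) (tech_stack : Option (List String)) : List String :=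
  let py_exts := ["**/*.py"]
  let ts_exts := ["**/*.ts", "**/*.tsx"]
  let js_exts := ["**/*.js", "**/*.jsx"]
  let go_exts := ["**/*.go"]
  let rs_exts := ["**/*.rs"]
  let java_exts := ["**/*.java"]
  let stack : PySem.Set String := PySem.Set.ofList (tech_stack.getD [])
  let exts :=
    if !(PySem.Set.inter stack (PySem.Set.ofList ["Python", "FastAPI", "Django", "Flask"])).isEmpty then
      py_exts
    else if !(PySem.Set.inter stack (PySem.Set.ofList ["TypeScript", "React", "Next.js", "Vue", "Svelte"])).isEmpty then
      ts_exts ++ js_exts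
    else if !(PySem.Set.inter stack (PySem.Set.ofList ["Node.js", "Express", "Fastify"])).isEmpty then
      js_exts ++ ts_exts
    else if !(PySem.Set.inter stack (PySem.Set.ofList ["Go"])).isEmpty then
      go_exts
    else if !(PySem.Set.inter stack (PySem.Set.ofList ["Rust"])).isEmpty then
      rs_exts
    else if !(PySem.Set.inter stack (PySem.Set.ofList ["Java"])).isEmpty then
      java_exts
    else
      py_exts ++ ts_exts ++ js_exts
  if layer_name = "main" ∨ layer_name = "." then
    exts
  else
    exts.map (fun e => layer_name ++ "/" ++ e)

-- ===== PORT B =====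
-- Source B's module constants: the flat tech-name→priority dict and the indexed extension table
def pvPriority : PySem.Dict String Int := PySem.Dict.ofList
  [("Python", 0), ("FastAPI", 0), ("Django", 0), ("Flask", 0),
   ("TypeScript", 1), ("React", 1), ("Next.js", 1), ("Vue", 1), ("Svelte", 1),
   ("Node.js", 2), ("Express", 2), ("Fastify", 2),
   ("Go", 3), ("Rust", 4), ("Java", 5)]

def pvExtsTable : List (List String) :=
  [["**/*.py"],
   ["**/*.ts", "**/*.tsx", "**/*.js", "**/*.jsx"],
   ["**/*.js", "**/*.jsx", "**/*.ts", "**/*.tsx"],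
   ["**/*.go"],
   ["**/*.rs"],
   ["**/*.java"],
   ["**/*.py", "**/*.ts", "**/*.tsx", "**/*.js", "**/*.jsx"]]

def layer_to_globs_py_alt (layer_name : String) (tech_stack : Option (List String)) : List String :=
  -- best = 6; for t in tech_stack or []: best = min(best, _PRIORITY.get(t, 6))
  let best : Int := (tech_stack.getD []).foldl (fun b t => min b (pvPriority.getD t 6)) 6
  let exts := (PySem.List.pyGet? pvExtsTable best).getD []   -- _EXTS[best]; best is always in 0..6
  if layer_name = "main" ∨ layer_name = "." then
    exts
  else
    exts.map (fun e => layer_name ++ "/" ++ e)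

-- ===== PRECONDITION & SPEC =====
def Spec_layer_to_globs_py (layer_name : String) (tech_stack : Option (List String)) (out : List String) : Prop := out = layer_to_globs_py_alt layer_name tech_stack
instance (layer_name : String) (tech_stack : Option (List String)) (out : List String) : Decidable (Spec_layer_to_globs_py layer_name tech_stack out) := by unfold Spec_layer_to_globs_py; infer_instance

-- ===== CLAIM (what is proved, stated in full; the proofs are below) =====
def Claim_equal_layer_to_globs_py : Prop := ∀ (layer_name : String) (tech_stack : Option (List String)), Dom_layer_to_globs_py layer_name tech_stack → Spec_layer_to_globs_py layer_name tech_stack (layer_to_globs_py layer_name tech_stack)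

-- ===== LEMMAS AND PROOFS =====

-- the priority of one tech name, as B computes it
def pvLang (x : String) : Int := pvPriority.getD x 6

-- B's fold over the whole stack list
def pvMinLang (l : List String) : Int := l.foldl (fun b t => min b (pvLang t)) 6

-- A's selector: index of the first group the list meets, 6 if none
def pvSelA (l : List String) : Int :=
  if l.any (fun x => decide (x ∈ (["Python", "FastAPI", "Django", "Flask"] : List String))) then 0
  else if l.any (fun x => decide (x ∈ (["TypeScript", "React", "Next.js", "Vue", "Svelte"] : List String))) then 1
  else if l.any (fun x => decide (x ∈ (["Node.js", "Express", "Fastify"] : List String))) then 2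
  else if l.any (fun x => decide (x ∈ (["Go"] : List String))) then 3
  else if l.any (fun x => decide (x ∈ (["Rust"] : List String))) then 4
  else if l.any (fun x => decide (x ∈ (["Java"] : List String))) then 5
  else 6

lemma pvLang_eq (x : String) :
    pvLang x =
      if x ∈ (["Python", "FastAPI", "Django", "Flask"] : List String) then 0
      else if x ∈ (["TypeScript", "React", "Next.js", "Vue", "Svelte"] : List String) then 1
      else if x ∈ (["Node.js", "Express", "Fastify"] : List String) then 2
      else if x ∈ (["Go"] : List String) then 3
      else if x ∈ (["Rust"] : List String) then 4
      else if x ∈ (["Java"] : List String) then 5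
      else 6 := by
  by_cases h0 : x ∈ (["Python", "FastAPI", "Django", "Flask"] : List String)
  · rw [if_pos h0]
    simp only [List.mem_cons, List.not_mem_nil, or_false] at h0
    rcases h0 with rfl | rfl | rfl | rfl <;> decide
  · rw [if_neg h0]
    by_cases h1 : x ∈ (["TypeScript", "React", "Next.js", "Vue", "Svelte"] : List String)
    · rw [if_pos h1]
      simp only [List.mem_cons, List.not_mem_nil, or_false] at h1
      rcases h1 with rfl | rfl | rfl | rfl | rfl <;> decide
    · rw [if_neg h1]
      by_cases h2 : x ∈ (["Node.js", "Express", "Fastify"] : List String)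
      · rw [if_pos h2]
        simp only [List.mem_cons, List.not_mem_nil, or_false] at h2
        rcases h2 with rfl | rfl | rfl <;> decide
      · rw [if_neg h2]
        by_cases h3 : x ∈ (["Go"] : List String)
        · rw [if_pos h3]
          simp only [List.mem_cons, List.not_mem_nil, or_false] at h3
          rcases h3 with rfl
          decide
        · rw [if_neg h3]
          by_cases h4 : x ∈ (["Rust"] : List String)
          · rw [if_pos h4]
            simp only [List.mem_cons, List.not_mem_nil, or_false] at h4
            rcases h4 with rfl
            decide
          · rw [if_neg h4]
            by_cases h5 : x ∈ (["Java"] : List String)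
            · rw [if_pos h5]
              simp only [List.mem_cons, List.not_mem_nil, or_false] at h5
              rcases h5 with rfl
              decide
            · rw [if_neg h5]
              have hk : PySem.Dict.get? pvPriority x = none := by
                rw [PySem.Dict.get?_eq_none_iff_not_mem_keys]
                have hkeys : pvPriority.keys =
                    ["Python", "FastAPI", "Django", "Flask", "TypeScript", "React", "Next.js",
                     "Vue", "Svelte", "Node.js", "Express", "Fastify", "Go", "Rust", "Java"] := by
                  decide
                rw [hkeys]
                simp only [List.mem_cons, List.not_mem_nil, or_false] at h0 h1 h2 h3 h4 h5 ⊢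
                tauto
              simp [pvLang, PySem.Dict.getD_eq_get?_getD, hk]

lemma pvLang_le (x : String) : pvLang x ≤ 6 := by
  rw [pvLang_eq]; split_ifs <;> omega

lemma pvMinLang_cons (x : String) (l : List String) :
    pvMinLang (x :: l) = min (pvLang x) (pvMinLang l) := by
  have key : ∀ (l : List String) (a : Int), a ≤ 6 →
      l.foldl (fun b t => min b (pvLang t)) a = min a (pvMinLang l) := by
    intro l
    induction l with
    | nil => intro a ha; simp [pvMinLang]; omega
    | cons y ys ih =>
      intro a ha
      have h1 := ih (min a (pvLang y)) (le_trans (min_le_left _ _) ha)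
      have h2 := ih (min 6 (pvLang y)) (min_le_left _ _)
      simp only [List.foldl_cons, pvMinLang] at *
      rw [h1, h2]
      have := pvLang_le y
      omega
  have h := key l (min 6 (pvLang x)) (min_le_left _ _)
  simp only [pvMinLang, List.foldl_cons]
  rw [h]
  have hx := pvLang_le x
  simp only [pvMinLang]
  omega

lemma pvSelA_bound (l : List String) : 0 ≤ pvSelA l ∧ pvSelA l ≤ 6 := by
  unfold pvSelA; split_ifs <;> omega

set_option maxHeartbeats 1000000 in
lemma pvSelA_cons (x : String) (l : List String) :
    pvSelA (x :: l) = min (pvLang x) (pvSelA l) := by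
  have hb := pvSelA_bound l
  rw [pvLang_eq]
  by_cases hA : x ∈ (["Python", "FastAPI", "Django", "Flask", "TypeScript", "React", "Next.js",
      "Vue", "Svelte", "Node.js", "Express", "Fastify", "Go", "Rust", "Java"] : List String)
  · simp only [List.mem_cons, List.not_mem_nil, or_false] at hA
    rcases hA with rfl | rfl | rfl | rfl | rfl | rfl | rfl | rfl | rfl | rfl | rfl | rfl |
      rfl | rfl | rfl <;>
    · unfold pvSelA
      simp only [List.any_cons, List.mem_cons, List.not_mem_nil, or_false]
      try simp
      split_ifs <;> omega
  · simp only [List.mem_cons, List.not_mem_nil, or_false] at hA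
    simp only [not_or] at hA
    obtain ⟨n1, n2, n3, n4, n5, n6, n7, n8, n9, n10, n11, n12, n13, n14, n15⟩ := hA
    unfold pvSelA
    simp only [List.any_cons, List.mem_cons, List.not_mem_nil, or_false,
      n1, n2, n3, n4, n5, n6, n7, n8, n9, n10, n11, n12, n13, n14, n15]
    try simp
    split_ifs <;> omega

lemma pvSelA_eq_minLang (l : List String) : pvSelA l = pvMinLang l := by
  induction l with
  | nil => simp [pvSelA, pvMinLang]
  | cons x xs ih => rw [pvMinLang_cons, pvSelA_cons, ih]

lemma inter_eq_nil (l G : List String) :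
    (PySem.Set.inter (PySem.Set.ofList l) (PySem.Set.ofList G)) = [] ↔ ∀ x ∈ l, x ∉ G := by
  simp only [PySem.Set.inter, List.filter_eq_nil_iff]
  constructor
  · intro h x hx hG
    exact h x (by simpa [PySem.Set.mem_ofList] using hx)
      (by simpa [PySem.Set.contains_iff, PySem.Set.mem_ofList] using hG)
  · intro h x hx hG
    simp only [PySem.Set.mem_ofList] at hx
    exact h x hx (by simpa [PySem.Set.contains_iff, PySem.Set.mem_ofList] using hG)

-- A's set-intersection emptiness test over Set.ofList l is a plain 'any' over l
lemma inter_isEmpty (l G : List String) :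
    (PySem.Set.inter (PySem.Set.ofList l) (PySem.Set.ofList G)).isEmpty
      = !(l.any (fun x => decide (x ∈ G))) := by
  rw [Bool.eq_iff_iff]
  simp only [List.isEmpty_iff, Bool.not_eq_true', List.any_eq_false, decide_eq_true_eq]
  exact inter_eq_nil l G

-- ===== VERDICT (by name: the statement is the Claim_ definition above) =====
theorem layer_to_globs_py_spec : Claim_equal_layer_to_globs_py := by
  intro layer_name tech_stack _
  unfold Spec_layer_to_globs_py layer_to_globs_py layer_to_globs_py_alt
  have hsel : (tech_stack.getD []).foldl (fun b t => min b (pvPriority.getD t 6)) 6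
      = pvSelA (tech_stack.getD []) := by
    rw [pvSelA_eq_minLang]; rfl
  rw [hsel]
  simp only [inter_isEmpty, Bool.not_not]
  unfold pvSelA
  split_ifs <;> rfl
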